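-- pv_equiv track=rewrite | github.com/guptakhil/show-tell | evaluation/evaluation_metrics.py | bleu_cook_refs
-- ===== SOURCE A (Python) =====
-- from collections import defaultdict
--
-- def bleu_precook(s, n=4):
-- 	'''Count all the n-grams in a sentence.
-- 	Args:
-- 		s: A string caption sentence.
-- 		n: The max length of n-grams.
-- 	Returns:
-- 		Length of the sentence, and a dict mapping n-grams to their counts in the sentence.
-- 	'''
-- 	words = s.split()
-- 	counts = defaultdict(int)
-- 	for k in range(1,n+1):
-- 		for i in range(len(words)-k+1):
-- 			ngram = tuple(words[i:i+k])
-- 			counts[ngram] += 1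
-- 	return (len(words), counts)
--
-- def bleu_cook_refs(refs, n=4):
-- 	'''Transform a list of reference sentences into a form usable by bleu_cook_test().
-- 	Args:
-- 		refs: A sequence of string reference sentences.
-- 		n: The max length of n-grams.
-- 	Returns:
-- 		Lengths of the reference sentences, and a dict mapping n-grams to their max counts in the reference sentences.
-- 	'''
-- 	reflen = []
-- 	maxcounts = {}
-- 	for ref in refs:
-- 		precooked = bleu_precook(ref, n)
-- 		rl = precooked[0]
-- 		counts = precooked[1]
-- 		reflen.append(rl)
-- 		for (ngram,count) in counts.items():
-- 			maxcounts[ngram] = max(maxcounts.get(ngram,0), count)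
-- 	return (reflen, maxcounts)
-- ===== SOURCE B (Python) =====
-- def bleu_cook_refs(refs, n=4):
--     '''Transform a list of reference sentences into a form usable by bleu_cook_test().
--
--     Single-pass variant: instead of building a per-reference count dict and then
--     merging it into maxcounts with max()/get(), stream every n-gram of every
--     reference through ONE dict whose entries carry (last_ref_index, run_count,
--     best_count); the running count is reset whenever the reference index changes,
--     and the best component keeps the maximum per-reference count seen so far.
--     '''
--     reflen = []
--     state = {}  # ngram -> (last ref index, count within that ref, max count over refs)
--     for r, ref in enumerate(refs):
--         words = ref.split()
--         reflen.append(len(words))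
--         for k in range(1, n + 1):
--             for i in range(len(words) - k + 1):
--                 g = tuple(words[i:i + k])
--                 st = state.get(g)
--                 if st is None:
--                     state[g] = (r, 1, 1)
--                 else:
--                     last, cnt, best = st
--                     cnt = cnt + 1 if last == r else 1
--                     state[g] = (r, cnt, best if best >= cnt else cnt)
--     return (reflen, {g: st[2] for g, st in state.items()})
-- ===== Notes on version B (the rewrite author's own statement) =====
-- stated objective: alternative
-- what changed: Replaces A's two-phase per-reference processing (build a full n-gram count dict per reference, then merge it into maxcounts with a max()/get() loop) by a single streaming dict keyed by n-gram whose entries carry (last reference index, running count within that reference, best count so far), updated once per n-gram occurrence with the running count reset on a reference change, so the per-reference count dict and the merge loop disappear.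
import Mathlib
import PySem

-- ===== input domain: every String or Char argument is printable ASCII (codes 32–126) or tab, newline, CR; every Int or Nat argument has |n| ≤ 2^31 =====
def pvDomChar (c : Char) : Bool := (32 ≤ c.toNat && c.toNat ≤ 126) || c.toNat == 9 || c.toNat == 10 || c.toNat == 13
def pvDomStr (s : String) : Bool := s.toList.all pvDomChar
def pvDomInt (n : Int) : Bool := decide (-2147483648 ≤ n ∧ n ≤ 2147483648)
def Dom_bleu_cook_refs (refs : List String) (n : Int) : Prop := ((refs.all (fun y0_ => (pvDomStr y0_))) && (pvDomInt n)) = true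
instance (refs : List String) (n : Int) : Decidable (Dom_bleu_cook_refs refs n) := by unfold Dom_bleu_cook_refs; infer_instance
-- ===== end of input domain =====

-- B replaces A's per-reference count dict + max()/get() merge loop by ONE streaming dict of
-- (last ref index, run count, best count) triples updated n-gram by n-gram (objective: alternative).

-- ===== PORT A =====
def bleu_precook (s : String) (n : Int) : Int × PySem.Dict (List String) Int :=
  let words := PySem.Str.split₀ s
  let counts : PySem.Dict (List String) Int :=
    (PySem.List.pyRange 1 (n + 1)).foldl (fun counts k =>
      (PySem.List.pyRange 0 ((words.length : Int) - k + 1)).foldl (fun counts i =>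
        counts.modify (PySem.List.slice words (some i) (some (i + k))) 0 (· + 1)) counts)
      PySem.Dict.empty
  ((words.length : Int), counts)

def bleu_cook_refs (refs : List String) (n : Int) : List Int × (List (List String × Int)) :=
  let acc := refs.foldl
    (fun (acc : List Int × PySem.Dict (List String) Int) ref =>
      let precooked := bleu_precook ref n
      let reflen := acc.1 ++ [precooked.1]
      let maxcounts := precooked.2.items.foldl
        (fun (m : PySem.Dict (List String) Int) p => m.insert p.1 (max (m.getD p.1 0) p.2)) acc.2
      (reflen, maxcounts))
    ([], PySem.Dict.empty)
  (acc.1, acc.2.items)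

-- ===== PORT B =====
-- value stored for n-gram g: Python's `state[g] = …` assignment in both branches of B's `if`
def altVal (r : Int) (st : PySem.Dict (List String) (Int × Int × Int)) (g : List String) :
    Int × Int × Int :=
  match st.get? g with
  | none => (r, 1, 1)
  | some (last, cnt0, best) =>
      let cnt : Int := if last == r then cnt0 + 1 else 1
      (r, cnt, if best ≥ cnt then best else cnt)

def bleu_cook_refs_alt (refs : List String) (n : Int) : List Int × (List (List String × Int)) :=
  let fin := (PySem.List.enumerate refs).foldl
    (fun (acc : List Int × PySem.Dict (List String) (Int × Int × Int)) p =>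
      let words := PySem.Str.split₀ p.2
      let state := (PySem.List.pyRange 1 (n + 1)).foldl (fun st k =>
        (PySem.List.pyRange 0 ((words.length : Int) - k + 1)).foldl (fun st i =>
          st.insert (PySem.List.slice words (some i) (some (i + k)))
            (altVal p.1 st (PySem.List.slice words (some i) (some (i + k))))) st) acc.2
      (acc.1 ++ [(words.length : Int)], state))
    ([], PySem.Dict.empty)
  (fin.1, fin.2.items.map (fun q => (q.1, q.2.2.2)))

-- ===== PRECONDITION & SPEC =====
def Spec_bleu_cook_refs (refs : List String) (n : Int) (out : List Int × (List (List String × Int))) : Prop := out = bleu_cook_refs_alt refs n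
instance (refs : List String) (n : Int) (out : List Int × (List (List String × Int))) : Decidable (Spec_bleu_cook_refs refs n out) := by unfold Spec_bleu_cook_refs; infer_instance

-- ===== CLAIM (what is proved, stated in full; the proofs are below) =====
def Claim_equal_bleu_cook_refs : Prop := ∀ (refs : List String) (n : Int), Dom_bleu_cook_refs refs n → Spec_bleu_cook_refs refs n (bleu_cook_refs refs n)

-- ===== LEMMAS AND PROOFS =====

-- the flattened stream of n-grams of one sentence, in A's and B's common generation order
def pvStream (words : List String) (n : Int) : List (List String) :=
  (PySem.List.pyRange 1 (n + 1)).flatMap (fun k =>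
    (PySem.List.pyRange 0 ((words.length : Int) - k + 1)).map
      (fun i => PySem.List.slice words (some i) (some (i + k))))

def bestOf (o : Option (Int × Int × Int)) : Int :=
  match o with
  | some t => t.2.2
  | none => 0

-- invariant between references: B's state projects onto A's maxcounts, keys aligned, lasts old
def pvInv (r : Int) (m : PySem.Dict (List String) Int)
    (st : PySem.Dict (List String) (Int × Int × Int)) : Prop :=
  st.keys = m.keys ∧ m.keys.Nodup ∧
  (∀ g, m.get? g = (st.get? g).map (fun t => t.2.2)) ∧
  (∀ g t, st.get? g = some t → t.1 < r)

-- both inner double loops are folds over the flattened stream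
theorem pv_nested_eq {γ : Type} (words : List String) (n : Int) (f : γ → List String → γ) (a0 : γ) :
    (PySem.List.pyRange 1 (n + 1)).foldl (fun a k =>
      (PySem.List.pyRange 0 ((words.length : Int) - k + 1)).foldl
        (fun a i => f a (PySem.List.slice words (some i) (some (i + k)))) a) a0
    = (pvStream words n).foldl f a0 := by
  simp [pvStream, List.foldl_flatMap, List.foldl_map]

theorem pv_precook_snd (s : String) (n : Int) :
    (bleu_precook s n).2
    = (pvStream (PySem.Str.split₀ s) n).foldl
        (fun d g => d.modify g 0 (· + 1)) PySem.Dict.empty := by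
  simp only [bleu_precook]
  exact pv_nested_eq (PySem.Str.split₀ s) n (fun d g => d.modify g 0 (· + 1)) (PySem.Dict.empty (κ := List String) (ν := Int))


theorem pv_counts_getD (s : String) (n : Int) (g : List String) :
    (bleu_precook s n).2.getD g 0 = ((pvStream (PySem.Str.split₀ s) n).count g : Int) := by
  rw [pv_precook_snd]
  rw [PySem.Dict.getD_foldl_modify_add_one]
  simp

theorem pv_counts_keys (s : String) (n : Int) :
    (bleu_precook s n).2.keys = PySem.Set.ofList (pvStream (PySem.Str.split₀ s) n) := by
  rw [pv_precook_snd]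
  rw [PySem.Dict.keys_foldl_modify (f := fun _ _ => (· + 1))]
  simp [PySem.Dict.keys_empty, ← PySem.Set.empty_eq, PySem.Set.update_empty]

theorem pv_counts_contains (s : String) (n : Int) (g : List String) :
    (bleu_precook s n).2.contains g = true ↔ g ∈ pvStream (PySem.Str.split₀ s) n := by
  rw [PySem.Dict.contains_iff_mem_keys, pv_counts_keys, PySem.Set.mem_ofList]

-- merging a fold of inserts leaves untouched keys alone
theorem pv_merge_untouched (l : List (List String × Int)) (m : PySem.Dict (List String) Int)
    (g : List String) (h : g ∉ l.map Prod.fst) :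
    (l.foldl (fun m p => m.insert p.1 (max (m.getD p.1 0) p.2)) m).get? g = m.get? g := by
  induction l generalizing m with
  | nil => rfl
  | cons p t ih =>
      simp only [List.map_cons, List.mem_cons, not_or] at h
      simp only [List.foldl_cons]
      rw [ih _ h.2, PySem.Dict.get?_insert_of_ne _ _ h.1]

theorem pv_merge_get? (l : List (List String × Int)) (hnd : (l.map Prod.fst).Nodup)
    (m : PySem.Dict (List String) Int) (g : List String) :
    (l.foldl (fun m p => m.insert p.1 (max (m.getD p.1 0) p.2)) m).get? g =
      match l.find? (fun p => p.1 == g) with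
      | some p => some (max (m.getD g 0) p.2)
      | none => m.get? g := by
  induction l generalizing m with
  | nil => rfl
  | cons p t ih =>
      simp only [List.map_cons, List.nodup_cons] at hnd
      simp only [List.foldl_cons]
      by_cases hg : p.1 = g
      · subst hg
        rw [pv_merge_untouched _ _ _ hnd.1]
        simp [PySem.Dict.get?_insert_self]
      · rw [ih hnd.2]
        have h1 : (m.insert p.1 (max (m.getD p.1 0) p.2)).getD g 0 = m.getD g 0 :=
          PySem.Dict.getD_insert_of_ne _ _ _ (Ne.symm hg)
        have h2 : (m.insert p.1 (max (m.getD p.1 0) p.2)).get? g = m.get? g :=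
          PySem.Dict.get?_insert_of_ne _ _ (Ne.symm hg)
        have hf : ((p :: t).find? (fun p => p.1 == g)) = t.find? (fun p => p.1 == g) := by
          simp [hg]
        rw [hf]
        cases t.find? (fun p => p.1 == g) with
        | none => simpa using h2
        | some q => simp [h1]

theorem pv_merge_get?' (c : PySem.Dict (List String) Int) (hnd : c.keys.Nodup)
    (m : PySem.Dict (List String) Int) (g : List String) :
    (c.items.foldl (fun m p => m.insert p.1 (max (m.getD p.1 0) p.2)) m).get? g =
      match c.get? g with
      | some v => some (max (m.getD g 0) v)
      | none => m.get? g := by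
  have : c.keys = c.items.map Prod.fst := by simp [PySem.Dict.keys]
  rw [pv_merge_get? c.items (this ▸ hnd) m g]
  cases hfind : c.items.find? (fun p => p.1 == g) with
  | none => simp [PySem.Dict.get?, hfind]
  | some q => simp [PySem.Dict.get?, hfind]

-- what B's state looks up after processing a prefix `pre` of the current reference's stream
def pvSpecSt (st0 : PySem.Dict (List String) (Int × Int × Int)) (r : Int)
    (pre : List (List String)) (g : List String) : Option (Int × Int × Int) :=
  if pre.count g = 0 then st0.get? g
  else some (r, (pre.count g : Int), max (bestOf (st0.get? g)) ((pre.count g : Int)))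

theorem pv_if_max (b c : Int) : (if b ≥ c then b else c) = max b c := by
  simp only [ge_iff_le, max_def]; split_ifs <;> omega

theorem pv_max_step (b c : Int) :
    (if max b c ≥ c + 1 then max b c else c + 1) = max b (c + 1) := by
  simp only [ge_iff_le, max_def]; split_ifs <;> omega

theorem pv_altFold_spec (r : Int) (st0 : PySem.Dict (List String) (Int × Int × Int))
    (hlast : ∀ g t, st0.get? g = some t → t.1 ≠ r) :
    ∀ (s pre : List (List String)) (st : PySem.Dict (List String) (Int × Int × Int)),
      (∀ g, st.get? g = pvSpecSt st0 r pre g) →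
      ∀ g, ((s.foldl (fun d x => d.insert x (altVal r d x)) st).get? g)
             = pvSpecSt st0 r (pre ++ s) g := by
  intro s
  induction s with
  | nil => intro pre st hst g; simpa using hst g
  | cons h t ih =>
      intro pre st hst g
      have hstep : ∀ g, ((st.insert h (altVal r st h)).get? g) = pvSpecSt st0 r (pre ++ [h]) g := by
        intro g
        by_cases hg : g = h
        · subst hg
          rw [PySem.Dict.get?_insert_self]
          have hcnt : (pre ++ [g]).count g = pre.count g + 1 := by
            simp [List.count_append]
          by_cases h0 : pre.count g = 0
          · have hstg : st.get? g = st0.get? g := by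
              have := hst g; rwa [pvSpecSt, if_pos h0] at this
            cases hs0 : st0.get? g with
            | none =>
                simp [altVal, hstg, hs0, pvSpecSt, hcnt, h0, bestOf]
            | some tr =>
                obtain ⟨l, c, b⟩ := tr
                have hne : l ≠ r := by
                  have := hlast g (l, c, b) hs0; simpa using this
                have hbeq : (l == r) = false := by simp [hne]
                simp only [altVal, hstg, hs0, hbeq, Bool.false_eq_true, if_false,
                  pvSpecSt, hcnt, h0]
                rw [pv_if_max]
                simp [bestOf]
          · have hstg : st.get? g = some (r, (pre.count g : Int),
                max (bestOf (st0.get? g)) ((pre.count g : Int))) := by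
              have := hst g; rwa [pvSpecSt, if_neg h0] at this
            have hne0 : (pre ++ [g]).count g ≠ 0 := by omega
            simp only [altVal, hstg, beq_self_eq_true, if_true]
            rw [pv_max_step]
            simp only [pvSpecSt, hcnt]
            push_cast
            rfl
        · rw [PySem.Dict.get?_insert_of_ne _ _ hg]
          have hcnt : (pre ++ [h]).count g = pre.count g := by
            have : (List.count g [h]) = 0 := by
              simp [Ne.symm hg]
            simp [List.count_append, this]
          rw [hst g]
          simp [pvSpecSt, hcnt]
      have := ih (pre ++ [h]) (st.insert h (altVal r st h)) hstep g
      simpa [List.append_assoc] using this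

theorem pv_altFold_get? (r : Int) (st0 : PySem.Dict (List String) (Int × Int × Int))
    (hlast : ∀ g t, st0.get? g = some t → t.1 ≠ r) (s : List (List String)) (g : List String) :
    ((s.foldl (fun d x => d.insert x (altVal r d x)) st0).get? g) = pvSpecSt st0 r s g := by
  have h0 : ∀ g, st0.get? g = pvSpecSt st0 r [] g := by
    intro g; simp [pvSpecSt]
  simpa using pv_altFold_spec r st0 hlast s [] st0 h0 g

theorem pv_inv_step (r : Int) (ref : String) (n : Int)
    (m : PySem.Dict (List String) Int) (st : PySem.Dict (List String) (Int × Int × Int))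
    (h : pvInv r m st) :
    pvInv (r + 1)
      ((bleu_precook ref n).2.items.foldl
        (fun m p => m.insert p.1 (max (m.getD p.1 0) p.2)) m)
      ((pvStream (PySem.Str.split₀ ref) n).foldl
        (fun d x => d.insert x (altVal r d x)) st) := by
  obtain ⟨hkeys, hnd, hget, hlast⟩ := h
  have hndc : (bleu_precook ref n).2.keys.Nodup := by
    rw [pv_counts_keys]; exact PySem.Set.nodup_ofList _
  have hlast' : ∀ g t, st.get? g = some t → t.1 ≠ r := by
    intro g t hs
    have := hlast g t hs; omega
  have hB : ∀ g, (((pvStream (PySem.Str.split₀ ref) n).foldl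
      (fun d x => d.insert x (altVal r d x)) st).get? g)
      = pvSpecSt st r (pvStream (PySem.Str.split₀ ref) n) g :=
    pv_altFold_get? r st hlast' _
  have hA : ∀ g, (((bleu_precook ref n).2.items.foldl
      (fun m p => m.insert p.1 (max (m.getD p.1 0) p.2)) m).get? g)
      = match (bleu_precook ref n).2.get? g with
        | some v => some (max (m.getD g 0) v)
        | none => m.get? g :=
    pv_merge_get?' _ hndc m
  have hcget : ∀ g, g ∈ pvStream (PySem.Str.split₀ ref) n →
      (bleu_precook ref n).2.get? g
        = some (((pvStream (PySem.Str.split₀ ref) n).count g : Int)) := by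
    intro g hmem
    have hcont : (bleu_precook ref n).2.contains g = true := (pv_counts_contains ref n g).2 hmem
    cases hc : (bleu_precook ref n).2.get? g with
    | none =>
        rw [PySem.Dict.get?_eq_none_iff_contains] at hc
        rw [hcont] at hc; cases hc
    | some v =>
        have hvd := pv_counts_getD ref n g
        rw [PySem.Dict.getD_eq_get?_getD, hc, Option.getD_some] at hvd
        rw [hvd]
  have hcnone : ∀ g, g ∉ pvStream (PySem.Str.split₀ ref) n →
      (bleu_precook ref n).2.get? g = none := by
    intro g hmem
    rw [PySem.Dict.get?_eq_none_iff_not_mem_keys, pv_counts_keys, PySem.Set.mem_ofList]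
    exact hmem
  refine ⟨?_, ?_, ?_, ?_⟩
  · rw [PySem.Dict.keys_foldl_insert (f := fun d x => altVal r d x),
      PySem.Dict.keys_foldl_insert_key (key := Prod.fst)
        (f := fun m p => max (m.getD p.1 0) p.2)]
    have hck : (bleu_precook ref n).2.items.map Prod.fst
        = PySem.Set.ofList (pvStream (PySem.Str.split₀ ref) n) := by
      rw [← pv_counts_keys]; simp [PySem.Dict.keys]
    rw [hck, hkeys, PySem.Set.update_eq_append_filter, PySem.Set.update_eq_append_filter,
      PySem.Set.ofList_ofList]
  · rw [PySem.Dict.keys_foldl_insert_key (key := Prod.fst)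
        (f := fun m p => max (m.getD p.1 0) p.2)]
    exact PySem.Set.nodup_update _ _ hnd
  · intro g
    rw [hA g, hB g]
    by_cases hmem : g ∈ pvStream (PySem.Str.split₀ ref) n
    · have hc0 : (pvStream (PySem.Str.split₀ ref) n).count g ≠ 0 := by
        have := List.count_pos_iff.2 hmem; omega
      rw [hcget g hmem]
      simp only [pvSpecSt, if_neg hc0, Option.map_some]
      have hbd : m.getD g 0 = bestOf (st.get? g) := by
        rw [PySem.Dict.getD_eq_get?_getD, hget g]
        cases st.get? g <;> simp [bestOf]
      rw [hbd]
    · have hc0 : (pvStream (PySem.Str.split₀ ref) n).count g = 0 :=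
        List.count_eq_zero.2 hmem
      rw [hcnone g hmem]
      simp only [pvSpecSt, if_pos hc0]
      exact hget g
  · intro g t hs
    rw [hB g] at hs
    by_cases hc0 : (pvStream (PySem.Str.split₀ ref) n).count g = 0
    · rw [pvSpecSt, if_pos hc0] at hs
      have := hlast g t hs; omega
    · rw [pvSpecSt, if_neg hc0] at hs
      have : t.1 = r := by
        have := congrArg (fun o => o.map Prod.fst) hs
        simp at this; simp [this]
      omega

theorem pv_inv_items (r : Int) (m : PySem.Dict (List String) Int)
    (st : PySem.Dict (List String) (Int × Int × Int)) (h : pvInv r m st) :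
    st.items.map (fun q => (q.1, q.2.2.2)) = m.items := by
  obtain ⟨hkeys, hnd, hget, _⟩ := h
  have hndst : st.keys.Nodup := hkeys ▸ hnd
  rw [PySem.Dict.items_eq_map_keys st hndst (0, 0, 0),
    PySem.Dict.items_eq_map_keys m hnd 0, List.map_map, hkeys]
  apply List.map_congr_left
  intro k hk
  have hkst : k ∈ st.keys := hkeys ▸ hk
  cases hs : st.get? k with
  | none =>
      rw [PySem.Dict.get?_eq_none_iff_not_mem_keys] at hs
      exact absurd hkst hs
  | some t =>
      have h1 : st.getD k (0, 0, 0) = t := PySem.Dict.getD_of_get?_eq_some _ _ hs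
      have h2 : m.get? k = some t.2.2 := by rw [hget k, hs]; rfl
      have h3 : m.getD k 0 = t.2.2 := PySem.Dict.getD_of_get?_eq_some _ _ h2
      simp [h1, h3]

theorem pv_inv_empty : pvInv 0 PySem.Dict.empty PySem.Dict.empty := by
  refine ⟨rfl, by simp [PySem.Dict.keys_empty], fun g => by simp [PySem.Dict.get?_empty],
    fun g t hs => by simp [PySem.Dict.get?_empty] at hs⟩

theorem pv_enum_cons (x : String) (t : List String) (r : Int) :
    PySem.List.enumerate (x :: t) r = (r, x) :: PySem.List.enumerate t (r + 1) := rfl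

theorem pv_outer (n : Int) :
    ∀ (refs : List String) (r : Int) (ls : List Int)
      (m : PySem.Dict (List String) Int) (st : PySem.Dict (List String) (Int × Int × Int)),
      pvInv r m st →
      (refs.foldl
          (fun (acc : List Int × PySem.Dict (List String) Int) ref =>
            (acc.1 ++ [(bleu_precook ref n).1],
              (bleu_precook ref n).2.items.foldl
                (fun m p => m.insert p.1 (max (m.getD p.1 0) p.2)) acc.2))
          (ls, m)).1
        = ((PySem.List.enumerate refs r).foldl
            (fun (acc : List Int × PySem.Dict (List String) (Int × Int × Int)) p =>
              (acc.1 ++ [((PySem.Str.split₀ p.2).length : Int)],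
                (PySem.List.pyRange 1 (n + 1)).foldl (fun st k =>
                  (PySem.List.pyRange 0 (((PySem.Str.split₀ p.2).length : Int) - k + 1)).foldl
                    (fun st i =>
                      st.insert (PySem.List.slice (PySem.Str.split₀ p.2) (some i) (some (i + k)))
                        (altVal p.1 st
                          (PySem.List.slice (PySem.Str.split₀ p.2) (some i) (some (i + k))))) st)
                  acc.2))
            (ls, st)).1
      ∧ pvInv (r + refs.length)
          ((refs.foldl
            (fun (acc : List Int × PySem.Dict (List String) Int) ref =>
              (acc.1 ++ [(bleu_precook ref n).1],
                (bleu_precook ref n).2.items.foldl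
                  (fun m p => m.insert p.1 (max (m.getD p.1 0) p.2)) acc.2))
            (ls, m)).2)
          (((PySem.List.enumerate refs r).foldl
            (fun (acc : List Int × PySem.Dict (List String) (Int × Int × Int)) p =>
              (acc.1 ++ [((PySem.Str.split₀ p.2).length : Int)],
                (PySem.List.pyRange 1 (n + 1)).foldl (fun st k =>
                  (PySem.List.pyRange 0 (((PySem.Str.split₀ p.2).length : Int) - k + 1)).foldl
                    (fun st i =>
                      st.insert (PySem.List.slice (PySem.Str.split₀ p.2) (some i) (some (i + k)))
                        (altVal p.1 st
                          (PySem.List.slice (PySem.Str.split₀ p.2) (some i) (some (i + k))))) st)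
                  acc.2))
            (ls, st)).2) := by
  intro refs
  induction refs with
  | nil =>
      intro r ls m st hInv
      exact ⟨rfl, by simpa using hInv⟩
  | cons ref t ih =>
      intro r ls m st hInv
      rw [pv_enum_cons, List.foldl_cons, List.foldl_cons]
      have hnest :
          (PySem.List.pyRange 1 (n + 1)).foldl (fun st k =>
            (PySem.List.pyRange 0 (((PySem.Str.split₀ ref).length : Int) - k + 1)).foldl
              (fun st i =>
                st.insert (PySem.List.slice (PySem.Str.split₀ ref) (some i) (some (i + k)))
                  (altVal r st
                    (PySem.List.slice (PySem.Str.split₀ ref) (some i) (some (i + k))))) st) st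
          = (pvStream (PySem.Str.split₀ ref) n).foldl
              (fun d x => d.insert x (altVal r d x)) st :=
        pv_nested_eq (PySem.Str.split₀ ref) n (fun d x => d.insert x (altVal r d x)) st
      have hlen : (bleu_precook ref n).1 = ((PySem.Str.split₀ ref).length : Int) := rfl
      have hInv' := pv_inv_step r ref n m st hInv
      have := ih (r + 1) (ls ++ [((PySem.Str.split₀ ref).length : Int)])
        ((bleu_precook ref n).2.items.foldl
          (fun m p => m.insert p.1 (max (m.getD p.1 0) p.2)) m)
        ((pvStream (PySem.Str.split₀ ref) n).foldl
          (fun d x => d.insert x (altVal r d x)) st) hInv'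
      rw [hnest, hlen]
      refine ⟨this.1, ?_⟩
      have harith : (r + 1) + (t.length : Int) = r + ((ref :: t).length : Int) := by
        simp [List.length_cons]; ring
      rw [← harith]
      exact this.2

-- ===== VERDICT (by name: the statement is the Claim_ definition above) =====
theorem bleu_cook_refs_spec : Claim_equal_bleu_cook_refs := by
  intro refs n _
  unfold Spec_bleu_cook_refs
  show bleu_cook_refs refs n = bleu_cook_refs_alt refs n
  simp only [bleu_cook_refs, bleu_cook_refs_alt]
  obtain ⟨h1, h2⟩ := pv_outer n refs 0 [] PySem.Dict.empty PySem.Dict.empty pv_inv_empty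
  exact Prod.ext h1 (pv_inv_items _ _ _ h2).symm
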